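-- pv_equiv track=rewrite | github.com/Recognition-Science-1/Journal | coupling_constants_residue.py | get_period
-- ===== SOURCE A (Python) =====
-- def phi_power_mod(n, m):
--     """Calculate φ^n mod m using Lucas numbers for exact computation"""
--     # Lucas numbers: L_n = φ^n + φ̂^n where φ̂ = (1-√5)/2
--     # This gives us integer calculations
--     if n == 0:
--         return 2 % m
--     elif n == 1:
--         return 1 % m
--
--     # Use recurrence: L_n = L_{n-1} + L_{n-2}
--     a, b = 2, 1
--     for _ in range(2, n+1):
--         a, b = b, (a + b) % m
--     return b
--
-- def get_period(m):
--     """Get the period of φ^n mod m"""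
--     seen = {}
--     for n in range(m * 2):
--         val = phi_power_mod(n, m)
--         if val in seen:
--             return n - seen[val]
--         seen[val] = n
--     return m
-- ===== SOURCE B (Python) =====
-- def get_period(m):
--     """Get the period of φ^n mod m"""
--     if m <= 0:
--         return m
--     seen = {}
--     a, b = 2 % m, 1 % m  # Lucas pair L_n, L_{n+1} mod m, advanced incrementally
--     for n in range(m * 2):
--         if a in seen:
--             return n - seen[a]
--         seen[a] = n
--         a, b = b, (a + b) % m
--     return m
-- ===== Notes on version B (the rewrite author's own statement) =====
-- stated objective: faster
-- what changed: B maintains the Lucas pair (L_n, L_{n+1}) mod m incrementally across the loop instead of recomputing L_n from scratch via phi_power_mod at every n, keeping the same dict-based first-repeat detection.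
import Mathlib
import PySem

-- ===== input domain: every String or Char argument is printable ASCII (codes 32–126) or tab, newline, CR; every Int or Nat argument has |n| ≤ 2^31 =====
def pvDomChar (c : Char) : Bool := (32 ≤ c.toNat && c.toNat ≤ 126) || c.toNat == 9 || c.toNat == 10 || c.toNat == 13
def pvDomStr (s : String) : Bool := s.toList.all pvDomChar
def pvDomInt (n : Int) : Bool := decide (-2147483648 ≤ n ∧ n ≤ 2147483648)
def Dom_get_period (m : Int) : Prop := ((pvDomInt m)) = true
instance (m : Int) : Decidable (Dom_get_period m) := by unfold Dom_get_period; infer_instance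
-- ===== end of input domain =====

-- B computes the Lucas residues incrementally (one pass, O(m)) instead of
-- recomputing each Lucas number from scratch inside the loop (A is O(m^2)),
-- keeping A's dict-based first-repeat detection unchanged.

-- ===== PORT A =====
-- A's helper: phi_power_mod(n, m), recomputing L_n mod m from (2, 1) each call
def phi_power_mod (n m : Int) : Int :=
  if n = 0 then PySem.Int.mod 2 m
  else if n = 1 then PySem.Int.mod 1 m
  else
    ((PySem.List.pyRange 2 (n + 1) 1).foldl
      (fun (ab : Int × Int) _ => (ab.2, PySem.Int.mod (ab.1 + ab.2) m)) (2, 1)).2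

-- A's 'for n in range(m*2)' loop with early return
def get_period_loopA (m : Int) : List Int → PySem.Dict Int Int → Int
  | [], _ => m
  | n :: ns, seen =>
    let val := phi_power_mod n m
    match seen.get? val with
    | some s => n - s
    | none => get_period_loopA m ns (seen.insert val n)

def get_period (m : Int) : Int :=
  get_period_loopA m (PySem.List.pyRange 0 (m * 2) 1) PySem.Dict.empty

-- ===== PORT B =====
-- B's loop: carries the current Lucas pair (a, b) = (L_n, L_{n+1}) mod m
def get_period_loopB (m : Int) : List Int → Int → Int → PySem.Dict Int Int → Int
  | [], _, _, _ => m
  | n :: ns, a, b, seen =>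
    match seen.get? a with
    | some s => n - s
    | none => get_period_loopB m ns b (PySem.Int.mod (a + b) m) (seen.insert a n)

def get_period_alt (m : Int) : Int :=
  if m ≤ 0 then m
  else
    get_period_loopB m (PySem.List.pyRange 0 (m * 2) 1)
      (PySem.Int.mod 2 m) (PySem.Int.mod 1 m) PySem.Dict.empty

-- ===== PRECONDITION & SPEC =====
def Spec_get_period (m : Int) (out : Int) : Prop := out = get_period_alt m
instance (m : Int) (out : Int) : Decidable (Spec_get_period m out) := by unfold Spec_get_period; infer_instance

-- ===== CLAIM (what is proved, stated in full; the proofs are below) =====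
def Claim_equal_get_period : Prop := ∀ (m : Int), Dom_get_period m → Spec_get_period m (get_period m)

-- ===== LEMMAS AND PROOFS =====

-- the unreduced Lucas sequence L_0 = 2, L_1 = 1
def lucas : Nat → Int
  | 0 => 2
  | 1 => 1
  | n + 2 => lucas n + lucas (n + 1)

-- a fold that ignores list elements is iteration of its step, length many times
theorem foldl_ignore {α σ : Type} (g : σ → σ) :
    ∀ (l : List α) (s : σ), l.foldl (fun t _ => g t) s = g^[l.length] s := by
  intro l
  induction l with
  | nil => intro s; rfl
  | cons x xs ih =>
      intro s
      simp [List.foldl_cons, ih, Function.iterate_succ_apply]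

-- state of A's inner fold after k steps, as Lucas residues
theorem iter_state (m : Int) (hm : 0 < m) (k : Nat) :
    ((fun (ab : Int × Int) => (ab.2, PySem.Int.mod (ab.1 + ab.2) m))^[k] (2, 1)).1 % m
        = lucas k % m ∧
    ((fun (ab : Int × Int) => (ab.2, PySem.Int.mod (ab.1 + ab.2) m))^[k] (2, 1)).2 % m
        = lucas (k + 1) % m ∧
    (1 ≤ k → ((fun (ab : Int × Int) => (ab.2, PySem.Int.mod (ab.1 + ab.2) m))^[k] (2, 1)).2
        = lucas (k + 1) % m) := by
  induction k with
  | zero => exact ⟨rfl, rfl, by omega⟩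
  | succ k ih =>
      obtain ⟨h1, h2, _⟩ := ih
      have key : ((fun (ab : Int × Int) => (ab.2, PySem.Int.mod (ab.1 + ab.2) m))^[k + 1] (2, 1)).2
          = lucas (k + 1 + 1) % m := by
        simp only [Function.iterate_succ_apply']
        rw [PySem.Int.mod_eq_emod_of_pos hm,
            show lucas (k + 1 + 1) = lucas k + lucas (k + 1) from rfl,
            Int.add_emod, h1, h2, ← Int.add_emod]
      refine ⟨?_, ?_, fun _ => key⟩
      · simp only [Function.iterate_succ_apply']
        exact h2
      · rw [key, Int.emod_emod_of_dvd _ (dvd_refl m)]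

-- A's helper computes the Lucas residue
theorem phi_char (m : Int) (hm : 0 < m) (n : Int) (hn : 0 ≤ n) :
    phi_power_mod n m = lucas n.toNat % m := by
  unfold phi_power_mod
  rcases eq_or_ne n 0 with rfl | h0
  · simpa using (PySem.Int.mod_eq_emod_of_pos hm (a := 2))
  rcases eq_or_ne n 1 with rfl | h1
  · simpa using (PySem.Int.mod_eq_emod_of_pos hm (a := 1))
  simp only [if_neg h0, if_neg h1]
  rw [foldl_ignore, PySem.List.length_pyRange_one]
  have hk : 1 ≤ (n + 1 - 2).toNat := by omega
  have := (iter_state m hm (n + 1 - 2).toNat).2.2 hk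
  rw [this]
  congr 2
  omega

-- the two early-return loops agree when B's pair carries the Lucas residues
theorem loops_eq (m : Int) (hm : 0 < m) :
    ∀ (k : Nat) (n : Int), 0 ≤ n → ∀ (seen : PySem.Dict Int Int),
      get_period_loopA m (PySem.List.pyRange n (n + k) 1) seen
        = get_period_loopB m (PySem.List.pyRange n (n + k) 1)
            (phi_power_mod n m) (phi_power_mod (n + 1) m) seen := by
  intro k
  induction k with
  | zero =>
      intro n _ seen
      rw [PySem.List.pyRange_one_eq_nil (by omega)]
      rfl
  | succ k ih =>
      intro n hn seen
      rw [PySem.List.pyRange_one_cons (by omega)]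
      cases hv : seen.get? (phi_power_mod n m) with
      | some s => simp [get_period_loopA, get_period_loopB, hv]
      | none =>
          simp only [get_period_loopA, get_period_loopB, hv]
          have hstep : PySem.Int.mod (phi_power_mod n m + phi_power_mod (n + 1) m) m
              = phi_power_mod (n + 1 + 1) m := by
            rw [phi_char m hm n hn, phi_char m hm (n + 1) (by omega),
                phi_char m hm (n + 1 + 1) (by omega)]
            rw [PySem.Int.mod_eq_emod_of_pos hm]
            have h2 : (n + 1 + 1).toNat = n.toNat + 2 := by omega
            have h1 : (n + 1).toNat = n.toNat + 1 := by omega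
            rw [h1, h2, show lucas (n.toNat + 2) = lucas n.toNat + lucas (n.toNat + 1) from rfl]
            rw [Int.add_emod (lucas n.toNat) _ m, ← Int.emod_emod_of_dvd _ (dvd_refl m),
                ← Int.add_emod]
          rw [hstep]
          have hrange : n + ((k + 1 : Nat) : Int) = (n + 1) + (k : Nat) := by push_cast; ring
          rw [hrange]
          exact ih (n + 1) (by omega) _

-- ===== VERDICT (by name: the statement is the Claim_ definition above) =====
theorem get_period_spec : Claim_equal_get_period := by
  intro m _
  unfold Spec_get_period get_period get_period_alt
  by_cases hm : m ≤ 0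
  · rw [if_pos hm, PySem.List.pyRange_one_eq_nil (by omega)]
    rfl
  · rw [if_neg hm]
    have hm' : 0 < m := by omega
    have e0 : phi_power_mod 0 m = PySem.Int.mod 2 m := by simp [phi_power_mod]
    have e1 : phi_power_mod (0 + 1) m = PySem.Int.mod 1 m := by norm_num [phi_power_mod]
    have hr : m * 2 = (0 : Int) + (((m * 2).toNat : Nat) : Int) := by omega
    rw [hr, loops_eq m hm' (m * 2).toNat 0 le_rfl PySem.Dict.empty, e0, e1]
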